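-- pv_equiv track=rewrite | github.com/phsftech-fz/loterias | src/fechamento_timemania.py | validar_jogo
-- ===== SOURCE A (Python) =====
-- from typing import List, Dict
--
-- def validar_jogo(jogo: List[int]) -> bool:
--     """Valida se um jogo está correto (10 números entre 1 e 80)"""
--     if len(jogo) != 10:
--         return False
--     if not all(1 <= n <= 80 for n in jogo):
--         return False
--     if len(set(jogo)) != 10:
--         return False
--     return True
-- ===== SOURCE B (Python) =====
-- def validar_jogo(jogo):
--     """Valida se um jogo está correto (10 números entre 1 e 80)"""
--     if len(jogo) != 10:
--         return False
--     s = sorted(jogo)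
--     return 1 <= s[0] and s[9] <= 80 and all(s[i] < s[i + 1] for i in range(9))
-- ===== Notes on version B (the rewrite author's own statement) =====
-- stated objective: alternative
-- what changed: Replaces the set-based duplicate check and full range scan with sort-then-scan: sort a copy, read the range bounds off the two ends of the sorted list, and detect duplicates as a non-strict adjacent pair.
import Mathlib
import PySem

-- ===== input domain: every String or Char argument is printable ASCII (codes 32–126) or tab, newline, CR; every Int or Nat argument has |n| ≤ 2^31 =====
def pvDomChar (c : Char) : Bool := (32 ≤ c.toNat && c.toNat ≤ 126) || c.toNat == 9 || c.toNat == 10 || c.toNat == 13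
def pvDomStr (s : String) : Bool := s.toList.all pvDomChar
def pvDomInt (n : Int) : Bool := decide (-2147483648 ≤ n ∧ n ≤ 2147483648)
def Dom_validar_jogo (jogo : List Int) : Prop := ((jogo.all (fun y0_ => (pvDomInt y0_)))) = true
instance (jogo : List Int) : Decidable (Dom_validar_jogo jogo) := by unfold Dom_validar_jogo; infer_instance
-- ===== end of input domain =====

-- B replaces the set-based duplicate check and full range scan by sort-then-scan
-- (bounds at the ends of the sorted copy, duplicates as a non-strict adjacent pair); same result, different algorithm.

-- ===== PORT A =====
def validar_jogo (jogo : List Int) : Bool :=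
  if jogo.length ≠ 10 then false
  else if ¬ (jogo.all (fun n => decide (1 ≤ n) && decide (n ≤ 80))) then false
  else if (PySem.Set.ofList jogo).length ≠ 10 then false
  else true

-- ===== PORT B =====
def vjAdj (s : List Int) : Bool :=
  (PySem.List.pyRange 0 9 1).all (fun i =>
    decide ((PySem.List.pyGet? s i).getD 0 < (PySem.List.pyGet? s (i + 1)).getD 0))

def vjCheck (s : List Int) : Bool :=
  decide (1 ≤ (PySem.List.pyGet? s 0).getD 0) &&
    (decide ((PySem.List.pyGet? s 9).getD 0 ≤ 80) && vjAdj s)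

def validar_jogo_alt (jogo : List Int) : Bool :=
  if jogo.length ≠ 10 then false
  else vjCheck (PySem.List.sorted jogo (fun x => x) false)

-- ===== PRECONDITION & SPEC =====
def Spec_validar_jogo (jogo : List Int) (out : Bool) : Prop := out = validar_jogo_alt jogo
instance (jogo : List Int) (out : Bool) : Decidable (Spec_validar_jogo jogo out) := by unfold Spec_validar_jogo; infer_instance

-- ===== CLAIM =====
def Claim_equal_validar_jogo : Prop := ∀ (jogo : List Int), Dom_validar_jogo jogo → Spec_validar_jogo jogo (validar_jogo jogo)

-- ===== LEMMAS AND PROOFS =====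

-- (Set.ofList xs).length = xs.length forces Nodup
theorem ofList_length_eq_iff_nodup (xs : List Int) :
    (PySem.Set.ofList xs).length = xs.length ↔ xs.Nodup := by
  constructor
  · intro h
    have hperm : (PySem.Set.ofList xs).Perm xs.dedup := by
      apply (List.perm_ext_iff_of_nodup (PySem.Set.nodup_ofList xs) xs.nodup_dedup).mpr
      intro a; rw [PySem.Set.mem_ofList, List.mem_dedup]
    have hlen : xs.dedup.length = xs.length := by rw [← hperm.length_eq, h]
    have := List.Sublist.eq_of_length (List.dedup_sublist xs) hlen
    rw [← List.dedup_eq_self]; exact this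
  · intro h; rw [PySem.Set.ofList_eq_self_of_nodup xs h]

theorem vjAdj_iff (s : List Int) (hlen : s.length = 10) :
    vjAdj s = true ↔ ∀ k : Nat, (hk : k + 1 < s.length) → s[k] < s[k + 1] := by
  unfold vjAdj
  rw [List.all_eq_true]
  constructor
  · intro h k hk
    have hk9 : (k : Int) < 9 := by omega
    have hmem : (k : Int) ∈ PySem.List.pyRange 0 9 1 := by
      rw [PySem.List.mem_pyRange_one]; omega
    have := h _ hmem
    rw [PySem.List.pyGet?_natCast] at this
    have hcast : ((k : Int) + 1) = ((k + 1 : Nat) : Int) := by push_cast; ring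
    rw [hcast, PySem.List.pyGet?_natCast] at this
    simp only [List.getElem?_eq_getElem (by omega : k < s.length),
      List.getElem?_eq_getElem hk, Option.getD_some, decide_eq_true_eq] at this
    exact this
  · intro h i hmem
    rw [PySem.List.mem_pyRange_one] at hmem
    obtain ⟨h0, h9⟩ := hmem
    obtain ⟨k, rfl⟩ := Int.eq_ofNat_of_zero_le h0
    have hk : k + 1 < s.length := by omega
    have := h k hk
    rw [PySem.List.pyGet?_natCast]
    have hcast : ((k : Int) + 1) = ((k + 1 : Nat) : Int) := by push_cast; ring
    rw [hcast, PySem.List.pyGet?_natCast]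
    simp only [List.getElem?_eq_getElem (by omega : k < s.length),
      List.getElem?_eq_getElem hk, Option.getD_some, decide_eq_true_eq]
    exact this

-- adjacent strict increase on a ≤-sorted list of the same members ↔ no duplicates
theorem adj_iff_nodup (s : List Int) (hp : s.Pairwise (· ≤ ·)) :
    (∀ k : Nat, (hk : k + 1 < s.length) → s[k] < s[k + 1]) ↔ s.Nodup := by
  constructor
  · intro h
    have hchain : s.IsChain (· < ·) := List.isChain_iff_getElem.mpr h
    have hpl : s.Pairwise (· < ·) := List.isChain_iff_pairwise.mp hchain
    exact hpl.imp (fun hab => ne_of_lt hab)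
  · intro hnd k hk
    have hle := List.pairwise_iff_getElem.mp hp k (k+1) (by omega) hk (by omega)
    have hne : s[k] ≠ s[k+1] :=
      List.pairwise_iff_getElem.mp hnd k (k+1) (by omega) hk (by omega)
    exact lt_of_le_of_ne hle hne

-- ===== VERDICT =====
theorem validar_jogo_spec : Claim_equal_validar_jogo := by
  intro jogo _
  unfold Spec_validar_jogo validar_jogo validar_jogo_alt
  by_cases hl : jogo.length = 10
  · rw [if_neg (not_not_intro hl), if_neg (not_not_intro hl)]
    simp only [vjCheck]
    set s := PySem.List.sorted jogo (fun x => x) false with hs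
    have hperm : s.Perm jogo := PySem.List.sorted_perm jogo (fun x => x) false
    have hslen : s.length = 10 := by rw [hperm.length_eq, hl]
    have hpair : s.Pairwise (· ≤ ·) := by
      have := PySem.List.sorted_pairwise jogo (fun x => x)
      simpa using this
    have h0lt : 0 < s.length := by omega
    have h9lt : 9 < s.length := by omega
    have hg0 : (PySem.List.pyGet? s 0).getD 0 = s[0] := by
      rw [show (0 : Int) = ((0 : Nat) : Int) from rfl, PySem.List.pyGet?_natCast,
        List.getElem?_eq_getElem h0lt, Option.getD_some]
    have hg9 : (PySem.List.pyGet? s 9).getD 0 = s[9] := by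
      rw [show (9 : Int) = ((9 : Nat) : Int) from rfl, PySem.List.pyGet?_natCast,
        List.getElem?_eq_getElem h9lt, Option.getD_some]
    -- range condition transfer
    have hrange : (jogo.all (fun n => decide (1 ≤ n) && decide (n ≤ 80))) = true ↔
        (1 ≤ s[0] ∧ s[9] ≤ 80) := by
      rw [List.all_eq_true]
      constructor
      · intro h
        have h0 := h _ (hperm.mem_iff.mp (s.getElem_mem h0lt))
        have h9 := h _ (hperm.mem_iff.mp (s.getElem_mem h9lt))
        simp only [Bool.and_eq_true, decide_eq_true_eq] at h0 h9
        exact ⟨h0.1, h9.2⟩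
      · rintro ⟨h1, h80⟩ n hn
        obtain ⟨i, hi, rfl⟩ := List.mem_iff_getElem.mp (hperm.mem_iff.mpr hn)
        have hm0 : s[0] ≤ s[i] := by
          rcases Nat.eq_zero_or_pos i with h | h
          · subst h; rfl
          · exact List.pairwise_iff_getElem.mp hpair 0 i h0lt hi h
        have hm9 : s[i] ≤ s[9] := by
          rcases eq_or_lt_of_le (show i ≤ 9 by omega) with h | h
          · subst h; rfl
          · exact List.pairwise_iff_getElem.mp hpair i 9 hi h9lt h
        simp only [Bool.and_eq_true, decide_eq_true_eq]
        exact ⟨le_trans h1 hm0, le_trans hm9 h80⟩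
    have hset : ((PySem.Set.ofList jogo).length = 10) ↔ jogo.Nodup := by
      rw [← hl]; exact ofList_length_eq_iff_nodup jogo
    have hadj : vjAdj s = true ↔ jogo.Nodup := by
      rw [vjAdj_iff s hslen, adj_iff_nodup s hpair, hperm.nodup_iff]
    rw [hg0, hg9]
    by_cases ha : (jogo.all (fun n => decide (1 ≤ n) && decide (n ≤ 80))) = true
    · rw [if_neg (not_not_intro ha)]
      obtain ⟨h1, h80⟩ := hrange.mp ha
      by_cases hn : jogo.Nodup
      · rw [if_neg (not_not_intro (hset.mpr hn)), hadj.mpr hn]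
        symm
        simp only [Bool.and_true, Bool.and_eq_true, decide_eq_true_eq]
        exact ⟨by exact_mod_cast h1, by exact_mod_cast h80⟩
      · rw [if_pos (fun h => hn (hset.mp h))]
        cases hvj : vjAdj s
        · simp
        · exact absurd (hadj.mp hvj) hn
    · rw [if_pos ha]
      rcases not_and_or.mp (fun h => ha (hrange.mpr h)) with h | h
      · have h' : ¬ (1 : Int) ≤ s[0] := by exact_mod_cast h
        simp [h']
      · simp [h]
  · rw [if_pos hl, if_pos hl]
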